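-- pv_equiv track=rewrite | github.com/Piratedpilot/Resum.AI | app.py | format_ai_analysis
-- ===== SOURCE A (Python) =====
-- def format_ai_analysis(analysis_text):
--     """Format AI analysis text with better styling"""
--     # Replace section headers with styled versions
--     sections = {
--         "## Overall Assessment": "🎯 Overall Assessment",
--         "## Professional Profile Analysis": "👤 Professional Profile Analysis",
--         "## Skills Analysis": "🛠️ Skills Analysis",
--         "## Experience Analysis": "💼 Experience Analysis",
--         "## Education Analysis": "🎓 Education Analysis",
--         "## Key Strengths": "✅ Key Strengths",
--         "## Areas for Improvement": "🎯 Areas for Improvement",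
--         "## ATS Optimization Assessment": "🤖 ATS Optimization Assessment",
--         "## Recommended Courses": "📚 Recommended Courses",
--         "## Resume Score": "⭐ Resume Score",
--         "## Role Alignment Analysis": "🎯 Role Alignment Analysis",
--         "## Job Match Analysis": "🤝 Job Match Analysis"
--     }
--
--     formatted_text = analysis_text
--     for old_header, new_header in sections.items():
--         if old_header in formatted_text:
--             formatted_text = formatted_text.replace(
--                 old_header,
--                 f"""
--                 <div style="background: linear-gradient(135deg, var(--primary-color), var(--secondary-color));
--                             color: white; padding: 12px 16px; border-radius: 8px; margin: 20px 0 10px 0;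
--                             font-weight: 600;">
--                     {new_header}
--                 </div>
--                 """
--             )
--
--     return formatted_text
-- ===== SOURCE B (Python) =====
-- def format_ai_analysis(analysis_text):
--     """Format AI analysis text with better styling (single left-to-right scan)."""
--     # (name, emoji): header = "## " + name, styled label = emoji + " " + name
--     entries = [
--         ("Overall Assessment", "\U0001F3AF"),
--         ("Professional Profile Analysis", "\U0001F464"),
--         ("Skills Analysis", "\U0001F6E0\uFE0F"),
--         ("Experience Analysis", "\U0001F4BC"),
--         ("Education Analysis", "\U0001F393"),
--         ("Key Strengths", "\u2705"),
--         ("Areas for Improvement", "\U0001F3AF"),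
--         ("ATS Optimization Assessment", "\U0001F916"),
--         ("Recommended Courses", "\U0001F4DA"),
--         ("Resume Score", "\u2B50"),
--         ("Role Alignment Analysis", "\U0001F3AF"),
--         ("Job Match Analysis", "\U0001F91D"),
--     ]
--     pre = ('\n                <div style="background: linear-gradient(135deg,'
--            ' var(--primary-color), var(--secondary-color)); \n             '
--            '               color: white; padding: 12px 16px; border-radius:'
--            ' 8px; margin: 20px 0 10px 0; \n                            font'
--            '-weight: 600;">\n                    ')
--     post = '\n                </div>\n                '
--     # header -> fully rendered replacement, built once
--     table = [("## " + name, pre + emoji + " " + name + post)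
--              for name, emoji in entries]
--
--     out = []
--     i = 0
--     n = len(analysis_text)
--     while i < n:
--         ch = analysis_text[i]
--         if ch == '#':
--             for header, rendered in table:
--                 if analysis_text.startswith(header, i):
--                     out.append(rendered)
--                     i += len(header)
--                     break
--             else:
--                 out.append(ch)
--                 i += 1
--         else:
--             out.append(ch)
--             i += 1
--     return ''.join(out)
-- ===== Notes on version B (the rewrite author's own statement) =====
-- stated objective: alternative
-- what changed: Replaces twelve sequential full-text str.replace passes by one left-to-right scan that consults a precomputed (header -> rendered div) table built from (name, emoji) pairs and emits each replacement at its match position in a single pass.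
import Mathlib
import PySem

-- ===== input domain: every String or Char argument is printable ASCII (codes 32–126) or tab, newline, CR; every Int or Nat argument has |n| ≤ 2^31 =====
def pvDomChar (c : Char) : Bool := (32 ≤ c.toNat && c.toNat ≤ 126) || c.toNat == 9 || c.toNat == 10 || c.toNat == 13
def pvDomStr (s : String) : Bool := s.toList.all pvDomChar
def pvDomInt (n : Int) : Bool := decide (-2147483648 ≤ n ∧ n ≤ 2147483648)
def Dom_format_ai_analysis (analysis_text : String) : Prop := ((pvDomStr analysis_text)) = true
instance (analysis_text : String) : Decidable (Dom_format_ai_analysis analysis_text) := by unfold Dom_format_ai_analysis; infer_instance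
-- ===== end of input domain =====

-- B replaces A's twelve sequential full-text replace passes by one left-to-right scan over the
-- text with a precomputed header → rendered-div table (objective: alternative single-pass algorithm).

-- ===== PORT A =====
-- A's literal data: the section-header dict and the two halves of the f-string template
def pvTmplPre : String := "\n                <div style=\"background: linear-gradient(135deg, var(--primary-color), var(--secondary-color)); \n                            color: white; padding: 12px 16px; border-radius: 8px; margin: 20px 0 10px 0; \n                            font-weight: 600;\">\n                    "
def pvTmplPost : String := "\n                </div>\n                "
def pvSections : List (String × String) := [
  ("## Overall Assessment", "🎯 Overall Assessment"),
  ("## Professional Profile Analysis", "👤 Professional Profile Analysis"),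
  ("## Skills Analysis", "🛠️ Skills Analysis"),
  ("## Experience Analysis", "💼 Experience Analysis"),
  ("## Education Analysis", "🎓 Education Analysis"),
  ("## Key Strengths", "✅ Key Strengths"),
  ("## Areas for Improvement", "🎯 Areas for Improvement"),
  ("## ATS Optimization Assessment", "🤖 ATS Optimization Assessment"),
  ("## Recommended Courses", "📚 Recommended Courses"),
  ("## Resume Score", "⭐ Resume Score"),
  ("## Role Alignment Analysis", "🎯 Role Alignment Analysis"),
  ("## Job Match Analysis", "🤝 Job Match Analysis")
]

-- A: for each (old_header, new_header) of the dict, if old_header in text, replace it by the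
-- rendered template (f-string = pvTmplPre ++ label ++ pvTmplPost)
def format_ai_analysis (analysis_text : String) : String :=
  ((PySem.Dict.ofList pvSections).items).foldl
    (fun formatted_text p =>
      if PySem.Str.isIn p.1 formatted_text then
        PySem.Str.replace formatted_text p.1 (pvTmplPre ++ p.2 ++ pvTmplPost)
      else formatted_text)
    analysis_text

-- ===== PORT B =====
-- Source B's data: (name, emoji) pairs; header = "## " + name, label = emoji + " " + name
def pvEntries : List (String × String) := [
  ("Overall Assessment", "🎯"),
  ("Professional Profile Analysis", "👤"),
  ("Skills Analysis", "🛠️"),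
  ("Experience Analysis", "💼"),
  ("Education Analysis", "🎓"),
  ("Key Strengths", "✅"),
  ("Areas for Improvement", "🎯"),
  ("ATS Optimization Assessment", "🤖"),
  ("Recommended Courses", "📚"),
  ("Resume Score", "⭐"),
  ("Role Alignment Analysis", "🎯"),
  ("Job Match Analysis", "🤝")
]
-- Source B's template halves, written as its adjacent-literal concatenation
def pvPreB : String :=
  "\n                <div style=\"background: linear-gradient(135deg," ++
  " var(--primary-color), var(--secondary-color)); \n             " ++
  "               color: white; padding: 12px 16px; border-radius:" ++
  " 8px; margin: 20px 0 10px 0; \n                            font" ++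
  "-weight: 600;\">\n                    "
def pvPostB : String := "\n                </div>\n                "
-- table = [("## " + name, pre + emoji + " " + name + post)] built once
def pvTableB : List (List Char × List Char) :=
  pvEntries.map (fun p =>
    (("## " ++ p.1).toList, (pvPreB ++ p.2 ++ " " ++ p.1 ++ pvPostB).toList))

-- the while-loop of Source B: one left-to-right scan; at a '#' try the table (first match wins),
-- emit the rendered div and jump i += len(header); otherwise copy the character.
-- (headers are nonempty, so Python's i += len(h) = dropping h.length chars = t.drop (h.length - 1))
def pvOnePass (table : List (List Char × List Char)) : List Char → List Char
  | [] => []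
  | c :: t =>
    if c = '#' then
      match table.find? (fun p => p.1.isPrefixOf (c :: t)) with
      | some hr => hr.2 ++ pvOnePass table (t.drop (hr.1.length - 1))
      | none => c :: pvOnePass table t
    else c :: pvOnePass table t
termination_by l => l.length
decreasing_by
  · simp only [List.length_cons]; simp only [List.length_drop]; omega
  · simp
  · simp

def format_ai_analysis_alt (analysis_text : String) : String :=
  String.ofList (pvOnePass pvTableB analysis_text.toList)

-- ===== PRECONDITION & SPEC =====
def Spec_format_ai_analysis (analysis_text : String) (out : String) : Prop := out = format_ai_analysis_alt analysis_text
instance (analysis_text : String) (out : String) : Decidable (Spec_format_ai_analysis analysis_text out) := by unfold Spec_format_ai_analysis; infer_instance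

-- ===== CLAIM (what is proved, stated in full; the proofs are below) =====
def Claim_equal_format_ai_analysis : Prop := ∀ (analysis_text : String), Dom_format_ai_analysis analysis_text → Spec_format_ai_analysis analysis_text (format_ai_analysis analysis_text)

-- ===== LEMMAS AND PROOFS =====

-- B's table coincides, entry by entry, with A's rendered (header, replacement) pairs
set_option maxRecDepth 100000 in
theorem pv_tables_eq :
    pvTableB = pvSections.map (fun p => (p.1.toList, (pvTmplPre ++ p.2 ++ pvTmplPost).toList)) := rfl

-- naive recursive form of Python str.replace for a nonempty pattern: leftmost, non-overlapping
def pvRepl (old new : List Char) : List Char → List Char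
  | [] => []
  | c :: t =>
    if old.isPrefixOf (c :: t) then new ++ pvRepl old new (t.drop (old.length - 1))
    else c :: pvRepl old new t
termination_by l => l.length
decreasing_by
  · simp only [List.length_cons]; simp only [List.length_drop]; omega
  · simp

-- A's loop, at the List Char level
def pvChain (hs : List (List Char × List Char)) (s : List Char) : List Char :=
  hs.foldl (fun l p => pvRepl p.1 p.2 l) s

-- the structural facts about the concrete table the equivalence rests on
def pvGood (table : List (List Char × List Char)) : Prop :=
  (∀ p ∈ table, p.1.take 3 = ['#', '#', ' '] ∧ (∀ ch ∈ p.1, ch ≠ '\n') ∧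
      (∀ ch ∈ p.1.drop 3, ch ≠ '#') ∧ p.2.take 1 = ['\n'] ∧ (∀ ch ∈ p.2, ch ≠ '#')) ∧
  table.Pairwise (fun p q => ¬(p.1 <+: q.1 ∨ q.1 <+: p.1))

theorem pv_take3 (l : List Char) (h : l.take 3 = ['#', '#', ' ']) :
    l = '#' :: '#' :: ' ' :: l.drop 3 := by
  conv_lhs => rw [← List.take_append_drop 3 l]
  rw [h]; rfl

theorem pv_take1 (l : List Char) (h : l.take 1 = ['\n']) : l = '\n' :: l.drop 1 := by
  conv_lhs => rw [← List.take_append_drop 1 l]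
  rw [h]; rfl

theorem pv_go_eq (old new : List Char) (hne : old ≠ []) :
    ∀ fuel l acc, l.length ≤ fuel →
      PySem.Chars.replace.go old new fuel l acc = acc.reverse ++ pvRepl old new l := by
  intro fuel
  induction fuel with
  | zero =>
    intro l acc hl
    have : l = [] := List.eq_nil_of_length_eq_zero (Nat.le_zero.mp hl)
    subst this
    simp [PySem.Chars.replace.go, pvRepl]
  | succ n ih =>
    intro l acc hl
    cases l with
    | nil => simp [PySem.Chars.replace.go, pvRepl]
    | cons c t =>
      rw [PySem.Chars.replace.go]
      by_cases hpf : old.isPrefixOf (c :: t)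
      · rw [if_pos hpf]
        obtain ⟨m, hm⟩ : ∃ m, old.length = m + 1 := by
          cases old with
          | nil => exact absurd rfl hne
          | cons a b => exact ⟨b.length, by simp⟩
        have hdrop : (c :: t).drop old.length = t.drop (old.length - 1) := by
          rw [hm]; simp
        have hlen : ((c :: t).drop old.length).length ≤ n := by
          simp only [List.length_drop, List.length_cons] at *
          omega
        rw [ih _ _ hlen]
        rw [pvRepl, if_pos hpf, hdrop]
        simp
      · rw [if_neg hpf]
        have hlen : t.length ≤ n := by simp at hl; omega
        rw [ih _ _ hlen]
        rw [pvRepl, if_neg hpf]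
        simp

theorem pv_replace_eq (s old new : List Char) (hne : old ≠ []) :
    PySem.Chars.replace s old new = pvRepl old new s := by
  rw [PySem.Chars.replace]
  rw [if_neg (by simpa [List.isEmpty_iff] using hne)]
  simpa using pv_go_eq old new hne s.length s [] le_rfl

theorem pv_repl_not_infix (old new s : List Char) (h : ¬ old <:+: s) :
    pvRepl old new s = s := by
  induction s with
  | nil => rw [pvRepl]
  | cons c t ih =>
    rw [pvRepl]
    rw [if_neg (fun hpf => h (List.IsPrefix.isInfix (List.isPrefixOf_iff_prefix.mp hpf)))]
    rw [ih (fun hi => h (hi.trans (List.suffix_cons c t).isInfix))]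

theorem pv_stepA (old new s : List Char) (hne : old ≠ []) :
    (if PySem.Chars.isIn old s then PySem.Chars.replace s old new else s) = pvRepl old new s := by
  by_cases hin : PySem.Chars.isIn old s
  · rw [if_pos hin, pv_replace_eq s old new hne]
  · rw [if_neg hin]
    exact (pv_repl_not_infix old new s
      ((PySem.Chars.isIn_eq_false_iff old s).mp (Bool.eq_false_iff.mpr hin))).symm

-- a pattern starting with '#' passes over a '#'-free block unchanged
theorem pv_repl_hash_free (old new p s : List Char) (hh : old.take 3 = ['#', '#', ' '])
    (hp : ∀ ch ∈ p, ch ≠ '#') : pvRepl old new (p ++ s) = p ++ pvRepl old new s := by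
  induction p with
  | nil => rfl
  | cons c p' ih =>
    have hc : c ≠ '#' := hp c (List.mem_cons_self ..)
    rw [List.cons_append, pvRepl]
    rw [if_neg (by
      intro hpf
      have := List.isPrefixOf_iff_prefix.mp hpf
      rw [pv_take3 old hh] at this
      exact hc (List.cons_prefix_cons.mp this).1.symm)]
    rw [ih (fun ch hch => hp ch (List.mem_cons_of_mem c hch))]
    rfl

-- replacing (with a replacement that begins '\n') never creates a new match of a '\n'-free pattern
theorem pv_not_prefix_repl (old n' : List Char) :
    ∀ s h', (∀ ch ∈ h', ch ≠ '\n') → ¬ h' <+: s → ¬ h' <+: pvRepl old ('\n' :: n') s := by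
  intro s
  induction s with
  | nil => intro h' _ hns; simpa [pvRepl] using hns
  | cons c t ih =>
    intro h' hnl hns
    rw [pvRepl]
    by_cases hpf : old.isPrefixOf (c :: t)
    · rw [if_pos hpf]
      intro hp
      cases h' with
      | nil => exact hns (List.nil_prefix)
      | cons a h'' =>
        rw [List.cons_append] at hp
        exact hnl a (List.mem_cons_self ..) (List.cons_prefix_cons.mp hp).1
    · rw [if_neg hpf]
      intro hp
      cases h' with
      | nil => exact hns (List.nil_prefix)
      | cons a h'' =>
        obtain ⟨hac, hp'⟩ := List.cons_prefix_cons.mp hp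
        subst hac
        by_cases ht : h'' <+: t
        · exact hns (List.cons_prefix_cons.mpr ⟨rfl, ht⟩)
        · exact ih h'' (fun ch hch => hnl ch (List.mem_cons_of_mem _ hch)) ht hp'

theorem pv_chain_nil (hs : List (List Char × List Char)) : pvChain hs [] = [] := by
  induction hs with
  | nil => rfl
  | cons p hs' ih => simpa [pvChain, pvRepl] using ih

-- no header matches at the front: the first character passes through the whole chain
theorem pv_chain_cons (hs : List (List Char × List Char)) (c : Char) :
    ∀ t, (∀ p ∈ hs, (∀ ch ∈ p.1, ch ≠ '\n') ∧ p.2.take 1 = ['\n']) →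
      (∀ p ∈ hs, ¬ p.1 <+: c :: t) → pvChain hs (c :: t) = c :: pvChain hs t := by
  induction hs with
  | nil => intro t _ _; rfl
  | cons q hs' ih =>
    intro t hstruct hnp
    have hq := hstruct q (List.mem_cons_self ..)
    obtain ⟨r', hr'⟩ : ∃ r', q.2 = '\n' :: r' := ⟨q.2.drop 1, pv_take1 q.2 hq.2⟩
    have hstep : pvRepl q.1 q.2 (c :: t) = c :: pvRepl q.1 q.2 t := by
      rw [pvRepl, if_neg (fun hpf =>
        hnp q (List.mem_cons_self ..) (List.isPrefixOf_iff_prefix.mp hpf))]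
    show pvChain hs' (pvRepl q.1 q.2 (c :: t)) = c :: pvChain hs' (pvRepl q.1 q.2 t)
    rw [hstep]
    exact ih (pvRepl q.1 q.2 t)
      (fun p hp => hstruct p (List.mem_cons_of_mem q hp))
      (fun p hp => by
        have h1 := (hstruct p (List.mem_cons_of_mem q hp)).1
        have h2 := hnp p (List.mem_cons_of_mem q hp)
        have hstep' := hstep
        rw [hr'] at hstep' ⊢
        rw [← hstep']
        exact pv_not_prefix_repl q.1 r' (c :: t) p.1 h1 h2)

-- a '#'-free block distributes out of the whole chain
theorem pv_chain_hash_free (hs : List (List Char × List Char)) (p : List Char)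
    (hp : ∀ ch ∈ p, ch ≠ '#') (hheads : ∀ q ∈ hs, q.1.take 3 = ['#', '#', ' ']) :
    ∀ s, pvChain hs (p ++ s) = p ++ pvChain hs s := by
  induction hs with
  | nil => intro s; rfl
  | cons q hs' ih =>
    intro s
    show pvChain hs' (pvRepl q.1 q.2 (p ++ s)) = p ++ pvChain hs' (pvRepl q.1 q.2 s)
    rw [pv_repl_hash_free q.1 q.2 p s (hheads q (List.mem_cons_self ..)) hp]
    exact ih (fun r hr => hheads r (List.mem_cons_of_mem q hr)) (pvRepl q.1 q.2 s)

theorem pv_not_prefix_div (h' h rest : List Char) (hd : ¬(h' <+: h ∨ h <+: h')) :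
    ¬ h' <+: h ++ rest := by
  intro hp
  rcases Nat.le_total h'.length h.length with hle | hle
  · exact hd (Or.inl (List.prefix_of_prefix_length_le hp (List.prefix_append h rest) hle))
  · exact hd (Or.inr (List.prefix_of_prefix_length_le (List.prefix_append h rest) hp hle))

-- a different (prefix-incomparable) header passes over a whole header occurrence unchanged
theorem pv_repl_skip_header (h' r' h rest : List Char) (hh' : h'.take 3 = ['#', '#', ' '])
    (hh : h.take 3 = ['#', '#', ' ']) (hw : ∀ ch ∈ h.drop 3, ch ≠ '#')
    (hd : ¬(h' <+: h ∨ h <+: h')) : pvRepl h' r' (h ++ rest) = h ++ pvRepl h' r' rest := by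
  have hdecomp := pv_take3 h hh
  have hdecomp' := pv_take3 h' hh'
  conv_lhs => rw [hdecomp]
  rw [List.cons_append, pvRepl]
  rw [if_neg (fun hpf => pv_not_prefix_div h' h rest hd
        (by rw [hdecomp]; exact List.isPrefixOf_iff_prefix.mp (by
          rw [hdecomp] at hpf ⊢; exact hpf)))]
  rw [List.cons_append, pvRepl]
  rw [if_neg (by
    intro hpf
    have := List.isPrefixOf_iff_prefix.mp hpf
    rw [hdecomp'] at this
    have h2 := (List.cons_prefix_cons.mp this).2
    exact absurd (List.cons_prefix_cons.mp h2).1 (by decide))]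
  rw [List.cons_append, pvRepl]
  rw [if_neg (by
    intro hpf
    have := List.isPrefixOf_iff_prefix.mp hpf
    rw [hdecomp'] at this
    exact absurd (List.cons_prefix_cons.mp this).1 (by decide))]
  rw [pv_repl_hash_free h' r' (h.drop 3) rest hh' hw]
  rw [hdecomp]
  rfl

theorem pv_chain_skip_header (pre : List (List Char × List Char)) (h : List Char)
    (hh : h.take 3 = ['#', '#', ' ']) (hw : ∀ ch ∈ h.drop 3, ch ≠ '#')
    (hpre : ∀ p ∈ pre, p.1.take 3 = ['#', '#', ' '] ∧ ¬(p.1 <+: h ∨ h <+: p.1)) :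
    ∀ rest, pvChain pre (h ++ rest) = h ++ pvChain pre rest := by
  induction pre with
  | nil => intro rest; rfl
  | cons q pre' ih =>
    intro rest
    have hq := hpre q (List.mem_cons_self ..)
    show pvChain pre' (pvRepl q.1 q.2 (h ++ rest)) = h ++ pvChain pre' (pvRepl q.1 q.2 rest)
    rw [pv_repl_skip_header q.1 q.2 h rest hq.1 hh hw hq.2]
    exact ih (fun p hp => hpre p (List.mem_cons_of_mem q hp)) (pvRepl q.1 q.2 rest)

theorem pv_repl_head_match (h r X : List Char) (hne : h ≠ []) :
    pvRepl h r (h ++ X) = r ++ pvRepl h r X := by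
  cases h with
  | nil => exact absurd rfl hne
  | cons a htl =>
    rw [List.cons_append, pvRepl]
    have hpf : (a :: htl).isPrefixOf (a :: (htl ++ X)) = true :=
      List.isPrefixOf_iff_prefix.mpr (by rw [← List.cons_append]; exact List.prefix_append _ _)
    rw [if_pos hpf]
    simp

-- MAIN LEMMA: on a good table, A's chain of replaces equals B's single pass
theorem pv_chain_eq_onePass (table : List (List Char × List Char)) (hg : pvGood table) :
    ∀ n (s : List Char), s.length ≤ n → pvChain table s = pvOnePass table s := by
  intro n
  induction n with
  | zero =>
    intro s hs
    have : s = [] := List.eq_nil_of_length_eq_zero (Nat.le_zero.mp hs)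
    subst this
    rw [pv_chain_nil, pvOnePass]
  | succ n ih =>
    intro s hs
    cases s with
    | nil => rw [pv_chain_nil, pvOnePass]
    | cons c t =>
      have hstruct : ∀ p ∈ table, (∀ ch ∈ p.1, ch ≠ '\n') ∧ p.2.take 1 = ['\n'] :=
        fun p hp => ⟨(hg.1 p hp).2.1, (hg.1 p hp).2.2.2.1⟩
      have hlent : t.length ≤ n := by simp at hs; omega
      by_cases hc : c = '#'
      · rcases hfind : table.find? (fun p => p.1.isPrefixOf (c :: t)) with _ | hr
        · -- no header matches here
          have hnp : ∀ p ∈ table, ¬ p.1 <+: c :: t := fun p hp hpre => by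
            have := List.find?_eq_none.mp hfind p hp
            simp [List.isPrefixOf_iff_prefix.mpr hpre] at this
          rw [pvOnePass, if_pos hc, hfind]
          rw [pv_chain_cons table c t hstruct hnp, ih t hlent]
        · -- the first matching header hr
          obtain ⟨hpfb, pre, post, hdec, hprefail⟩ := List.find?_eq_some_iff_append.mp hfind
          have hmem : hr ∈ table := by rw [hdec]; exact List.mem_append_right _ (List.mem_cons_self ..)
          obtain ⟨hh3, hhnl, hhw, hr1, hrh⟩ := hg.1 hr hmem
          have hpfx : hr.1 <+: c :: t := List.isPrefixOf_iff_prefix.mp hpfb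
          have hne : hr.1 ≠ [] := by rw [pv_take3 hr.1 hh3]; simp
          -- decompose the input at the match
          have htake : List.take hr.1.length (c :: t) = hr.1 :=
            (List.prefix_iff_eq_take.mp hpfx).symm
          have hsplit : c :: t = hr.1 ++ (c :: t).drop hr.1.length := by
            conv_lhs => rw [← List.take_append_drop hr.1.length (c :: t)]
            rw [htake]
          have hlpos : ∃ m, hr.1.length = m + 1 := by
            cases hq : hr.1 with
            | nil => exact absurd hq hne
            | cons a b => exact ⟨b.length, by simp⟩
          obtain ⟨m, hm⟩ := hlpos
          have hrest : (c :: t).drop hr.1.length = t.drop (hr.1.length - 1) := by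
            rw [hm]; simp
          set rest := t.drop (hr.1.length - 1) with hrestdef
          have hrestlen : rest.length ≤ n := by
            simp only [hrestdef, List.length_drop]
            omega
          -- the chain rewrites to: rendered div ++ chain of the rest
          have hpre3 : ∀ p ∈ pre, p.1.take 3 = ['#', '#', ' '] ∧ ¬(p.1 <+: hr.1 ∨ hr.1 <+: p.1) := by
            intro p hp
            refine ⟨(hg.1 p (by rw [hdec]; exact List.mem_append_left _ hp)).1, ?_⟩
            have hpw := hg.2
            rw [hdec, List.pairwise_append] at hpw
            exact hpw.2.2 p hp hr (List.mem_cons_self ..)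
          have key : pvChain table (c :: t) = hr.2 ++ pvChain table rest := by
            conv_lhs => rw [hsplit, hrest]
            rw [hdec]
            show pvChain (pre ++ hr :: post) (hr.1 ++ rest) = _
            rw [pvChain, List.foldl_append, ← pvChain, ← pvChain]
            rw [pv_chain_skip_header pre hr.1 hh3 hhw hpre3 rest]
            show pvChain post (pvRepl hr.1 hr.2 (hr.1 ++ pvChain pre rest)) = _
            rw [pv_repl_head_match hr.1 hr.2 (pvChain pre rest) hne]
            rw [pv_chain_hash_free post hr.2 hrh
              (fun q hq => (hg.1 q (by rw [hdec]; exact List.mem_append_right _ (List.mem_cons_of_mem hr hq))).1)]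
            conv_rhs => rw [pvChain, List.foldl_append, List.foldl_cons]
            rfl
          rw [key, ih rest hrestlen, pvOnePass, if_pos hc, hfind]
      · -- c is not '#': no header can match
        have hnp : ∀ p ∈ table, ¬ p.1 <+: c :: t := fun p hp hpre => by
          rw [pv_take3 p.1 (hg.1 p hp).1] at hpre
          exact hc (List.cons_prefix_cons.mp hpre).1.symm
        rw [pvOnePass, if_neg hc]
        rw [pv_chain_cons table c t hstruct hnp, ih t hlent]

-- A's String-level fold equals the Char-level chain over the rendered table
set_option maxRecDepth 100000 in
theorem pv_fold_toList (L : List (String × String)) :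
    ∀ s : String, (∀ p ∈ L, p.1 ≠ "") →
      (L.foldl (fun formatted_text p =>
          if PySem.Str.isIn p.1 formatted_text then
            PySem.Str.replace formatted_text p.1 (pvTmplPre ++ p.2 ++ pvTmplPost)
          else formatted_text) s).toList
      = pvChain (L.map (fun p => (p.1.toList, (pvTmplPre ++ p.2 ++ pvTmplPost).toList))) s.toList := by
  induction L with
  | nil => intro s _; rfl
  | cons p L' ih =>
    intro s hne
    have hne1 : p.1.toList ≠ [] := fun hnil =>
      hne p (List.mem_cons_self ..) (String.toList_inj.mp (by rw [hnil]; rfl))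
    have hstate : (if PySem.Str.isIn p.1 s then
        PySem.Str.replace s p.1 (pvTmplPre ++ p.2 ++ pvTmplPost) else s).toList
        = pvRepl p.1.toList (pvTmplPre ++ p.2 ++ pvTmplPost).toList s.toList := by
      rw [apply_ite String.toList, PySem.Str.toList_replace]
      have hiseq : PySem.Str.isIn p.1 s = PySem.Chars.isIn p.1.toList s.toList := by
        simp [PySem.Str.isIn]
      rw [hiseq]
      exact pv_stepA p.1.toList (pvTmplPre ++ p.2 ++ pvTmplPost).toList s.toList hne1
    rw [List.foldl_cons, List.map_cons]
    rw [ih _ (fun q hq => hne q (List.mem_cons_of_mem p hq)), hstate]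
    conv_rhs => rw [pvChain, List.foldl_cons]
    rfl

set_option maxRecDepth 100000 in
theorem pv_items_eq : (PySem.Dict.ofList pvSections).items = pvSections := by decide

set_option maxRecDepth 100000 in
theorem pv_sections_facts_b : (pvSections.all (fun q =>
    (q.1.toList.take 3 == ['#', '#', ' ']) && q.1.toList.all (fun ch => ch != '\n') &&
    (q.1.toList.drop 3).all (fun ch => ch != '#') && q.2.toList.all (fun ch => ch != '#'))) = true := by
  decide

theorem pv_sections_facts : ∀ q ∈ pvSections,
    q.1.toList.take 3 = ['#', '#', ' '] ∧ (∀ ch ∈ q.1.toList, ch ≠ '\n') ∧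
    (∀ ch ∈ q.1.toList.drop 3, ch ≠ '#') ∧ (∀ ch ∈ q.2.toList, ch ≠ '#') := by
  have h := pv_sections_facts_b
  rw [List.all_eq_true] at h
  intro q hq
  have h' := h q hq
  simp only [Bool.and_eq_true, beq_iff_eq, List.all_eq_true, bne_iff_ne] at h'
  exact ⟨h'.1.1.1, h'.1.1.2, h'.1.2, h'.2⟩

set_option maxRecDepth 100000 in
theorem pv_tmplPre_hash_b : pvTmplPre.toList.all (fun ch => ch != '#') = true := by decide

theorem pv_tmplPre_hash : ∀ ch ∈ pvTmplPre.toList, ch ≠ '#' := by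
  have h := pv_tmplPre_hash_b
  rw [List.all_eq_true] at h
  intro ch hch
  simpa using h ch hch

set_option maxRecDepth 100000 in
theorem pv_tmplPost_hash_b : pvTmplPost.toList.all (fun ch => ch != '#') = true := by decide

theorem pv_tmplPost_hash : ∀ ch ∈ pvTmplPost.toList, ch ≠ '#' := by
  have h := pv_tmplPost_hash_b
  rw [List.all_eq_true] at h
  intro ch hch
  simpa using h ch hch

set_option maxRecDepth 100000 in
theorem pv_tmplPre_take1 : pvTmplPre.toList.take 1 = ['\n'] := by decide

set_option maxRecDepth 100000 in
theorem pv_pairwise :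
    (pvSections.map (fun p => (p.1.toList, (pvTmplPre ++ p.2 ++ pvTmplPost).toList))).Pairwise
      (fun p q => ¬(p.1 <+: q.1 ∨ q.1 <+: p.1)) := by decide

set_option maxRecDepth 100000 in
theorem pv_good_table : pvGood pvTableB := by
  rw [pv_tables_eq]
  refine ⟨?_, pv_pairwise⟩
  intro p hp
  rw [List.mem_map] at hp
  obtain ⟨q, hq, rfl⟩ := hp
  obtain ⟨f1, f2, f3, f4⟩ := pv_sections_facts q hq
  refine ⟨f1, f2, f3, ?_, ?_⟩
  · show ((pvTmplPre ++ q.2 ++ pvTmplPost).toList).take 1 = ['\n']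
    rw [String.toList_append, String.toList_append]
    have h1 : pvTmplPre.toList = '\n' :: pvTmplPre.toList.drop 1 := pv_take1 _ pv_tmplPre_take1
    rw [h1]; rfl
  · show ∀ ch ∈ (pvTmplPre ++ q.2 ++ pvTmplPost).toList, ch ≠ '#'
    rw [String.toList_append, String.toList_append]
    intro ch hch
    rcases List.mem_append.mp hch with h | h
    · rcases List.mem_append.mp h with h2 | h2
      · exact pv_tmplPre_hash ch h2
      · exact f4 ch h2
    · exact pv_tmplPost_hash ch h

set_option maxRecDepth 100000 in
theorem pv_sections_nonempty : ∀ p ∈ pvSections, p.1 ≠ "" := by decide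

-- ===== VERDICT (by name: the statement is the Claim_ definition above) =====
set_option maxRecDepth 100000 in
theorem format_ai_analysis_spec : Claim_equal_format_ai_analysis := by
  intro analysis_text _
  unfold Spec_format_ai_analysis format_ai_analysis format_ai_analysis_alt
  rw [pv_items_eq]
  apply String.toList_inj.mp
  rw [pv_fold_toList pvSections analysis_text pv_sections_nonempty]
  rw [String.toList_ofList, ← pv_tables_eq]
  exact pv_chain_eq_onePass pvTableB pv_good_table analysis_text.toList.length
    analysis_text.toList le_rfl
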